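-- pv_equiv track=rewrite | github.com/ahmed-145/ACR-QA | CORE/engines/path_feasibility.py | _parse_feasibility_response
-- ===== SOURCE A (Python) =====
-- def _parse_feasibility_response(text: str) -> tuple[str, str, str]:
--     """
--     Parse the 3-line feasibility response.
--     Returns (verdict, confidence, reasoning) with safe fallbacks.
--     """
--     verdict = "UNKNOWN"
--     confidence = "LOW"
--     reasoning = "Could not parse feasibility response."
--
--     for line in text.strip().splitlines():
--         line = line.strip()
--         if line.startswith("VERDICT:"):
--             raw = line.split(":", 1)[1].strip().upper()
--             if raw in ("REACHABLE", "UNREACHABLE", "UNKNOWN"):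
--                 verdict = raw
--         elif line.startswith("CONFIDENCE:"):
--             raw = line.split(":", 1)[1].strip().upper()
--             if raw in ("HIGH", "MEDIUM", "LOW"):
--                 confidence = raw
--         elif line.startswith("REASONING:"):
--             reasoning = line.split(":", 1)[1].strip()
--
--     return verdict, confidence, reasoning
-- ===== SOURCE B (Python) =====
-- def _find_valid(lines, prefix, allowed, default):
--     # first (i.e. in original order: last) valid value for this field
--     for ln in lines:
--         if ln.startswith(prefix):
--             v = ln.split(":", 1)[1].strip().upper()
--             if v in allowed:
--                 return v
--     return default
--
--
-- def _find_raw(lines, prefix, default):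
--     for ln in lines:
--         if ln.startswith(prefix):
--             return ln.split(":", 1)[1].strip()
--     return default
--
--
-- def _parse_feasibility_response(text: str) -> tuple[str, str, str]:
--     lines = [ln.strip() for ln in reversed(text.strip().splitlines())]
--     return (
--         _find_valid(lines, "VERDICT:", ("REACHABLE", "UNREACHABLE", "UNKNOWN"), "UNKNOWN"),
--         _find_valid(lines, "CONFIDENCE:", ("HIGH", "MEDIUM", "LOW"), "LOW"),
--         _find_raw(lines, "REASONING:", "Could not parse feasibility response."),
--     )
-- ===== Notes on version B (the rewrite author's own statement) =====
-- stated objective: alternative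
-- what changed: Replaced A's single forward loop that threads three mutable state fields through elif branches by three independent reverse scans of the stripped lines, each returning at the first valid match from the end (equivalent to A's last-valid-wins).
import Mathlib
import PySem

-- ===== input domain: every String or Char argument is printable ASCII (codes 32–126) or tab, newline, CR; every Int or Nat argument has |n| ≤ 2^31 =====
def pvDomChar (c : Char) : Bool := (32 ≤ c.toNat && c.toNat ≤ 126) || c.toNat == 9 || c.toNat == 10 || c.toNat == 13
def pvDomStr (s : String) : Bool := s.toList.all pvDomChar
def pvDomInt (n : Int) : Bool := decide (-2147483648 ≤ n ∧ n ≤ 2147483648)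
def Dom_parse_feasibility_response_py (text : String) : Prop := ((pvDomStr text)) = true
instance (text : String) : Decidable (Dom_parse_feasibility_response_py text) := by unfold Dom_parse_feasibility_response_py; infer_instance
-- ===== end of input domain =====

-- B replaces A's single forward fold carrying three state fields by three independent
-- reverse scans with early exit (first valid match from the end = A's last-valid-wins);
-- objective: alternative decomposition, same cost.

-- shared by both ports: Python's  line.split(":", 1)[1].strip()
def pvAfterColon (line : String) : String :=
  PySem.Str.strip (((PySem.Str.splitMax? line ":" 1).getD []).getD 1 "")

-- ===== PORT A =====
def pvStepA (st : String × String × String) (line0 : String) : String × String × String :=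
  let line := PySem.Str.strip line0
  if PySem.Str.startswith line "VERDICT:" then
    let raw := PySem.Str.upper (pvAfterColon line)
    if raw ∈ ["REACHABLE", "UNREACHABLE", "UNKNOWN"] then (raw, st.2.1, st.2.2) else st
  else if PySem.Str.startswith line "CONFIDENCE:" then
    let raw := PySem.Str.upper (pvAfterColon line)
    if raw ∈ ["HIGH", "MEDIUM", "LOW"] then (st.1, raw, st.2.2) else st
  else if PySem.Str.startswith line "REASONING:" then
    (st.1, st.2.1, pvAfterColon line)
  else st

def parse_feasibility_response_py (text : String) : String × String × String :=
  (PySem.Str.splitlines (PySem.Str.strip text)).foldl pvStepA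
    ("UNKNOWN", "LOW", "Could not parse feasibility response.")

-- ===== PORT B =====
def pvFindValid (lines : List String) (pre : String) (allowed : List String) (dflt : String) : String :=
  match lines with
  | [] => dflt
  | ln :: rest =>
    if PySem.Str.startswith ln pre then
      let v := PySem.Str.upper (pvAfterColon ln)
      if v ∈ allowed then v else pvFindValid rest pre allowed dflt
    else pvFindValid rest pre allowed dflt

def pvFindRaw (lines : List String) (pre : String) (dflt : String) : String :=
  match lines with
  | [] => dflt
  | ln :: rest =>
    if PySem.Str.startswith ln pre then pvAfterColon ln
    else pvFindRaw rest pre dflt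

def parse_feasibility_response_py_alt (text : String) : String × String × String :=
  let lines := ((PySem.Str.splitlines (PySem.Str.strip text)).reverse).map PySem.Str.strip
  (pvFindValid lines "VERDICT:" ["REACHABLE", "UNREACHABLE", "UNKNOWN"] "UNKNOWN",
   pvFindValid lines "CONFIDENCE:" ["HIGH", "MEDIUM", "LOW"] "LOW",
   pvFindRaw lines "REASONING:" "Could not parse feasibility response.")

-- ===== PRECONDITION & SPEC =====
def Spec_parse_feasibility_response_py (text : String) (out : String × String × String) : Prop := out = parse_feasibility_response_py_alt text
instance (text : String) (out : String × String × String) : Decidable (Spec_parse_feasibility_response_py text out) := by unfold Spec_parse_feasibility_response_py; infer_instance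

-- ===== CLAIM (what is proved, stated in full; the proofs are below) =====
def Claim_equal_parse_feasibility_response_py : Prop := ∀ (text : String), Dom_parse_feasibility_response_py text → Spec_parse_feasibility_response_py text (parse_feasibility_response_py text)

-- ===== LEMMAS AND PROOFS =====

-- two distinct prefixes with different first characters cannot both be prefixes of a line
lemma pv_sw_disj (l p q : String) (a b : Char) (hp : p.toList = a :: (p.toList.tail))
    (hq : q.toList = b :: (q.toList.tail)) (hab : a ≠ b)
    (h : PySem.Str.startswith l p = true) : PySem.Str.startswith l q = false := by
  rw [Bool.eq_false_iff]
  intro h2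
  rw [PySem.Str.startswith_eq, PySem.Chars.startswith_iff] at h h2
  obtain ⟨t1, e1⟩ := h
  obtain ⟨t2, e2⟩ := h2
  rw [← e1, hq, hp] at e2
  simp at e2
  exact hab e2.1.symm

lemma pv_findValid_append (xs : List String) (y p : String) (a : List String) (d : String) :
    pvFindValid (xs ++ [y]) p a d =
      pvFindValid xs p a
        (if PySem.Str.startswith y p then
           (if PySem.Str.upper (pvAfterColon y) ∈ a then PySem.Str.upper (pvAfterColon y) else d)
         else d) := by
  induction xs with
  | nil => simp [pvFindValid]
  | cons x xs ih => simp only [List.cons_append, pvFindValid, ih]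

lemma pv_findRaw_append (xs : List String) (y p d : String) :
    pvFindRaw (xs ++ [y]) p d =
      pvFindRaw xs p (if PySem.Str.startswith y p then pvAfterColon y else d) := by
  induction xs with
  | nil => simp [pvFindRaw]
  | cons x xs ih => simp only [List.cons_append, pvFindRaw, ih]

lemma pv_stepA_eq (st : String × String × String) (l : String) :
    pvStepA st l =
      ((if PySem.Str.startswith (PySem.Str.strip l) "VERDICT:" then
          (if PySem.Str.upper (pvAfterColon (PySem.Str.strip l)) ∈ ["REACHABLE", "UNREACHABLE", "UNKNOWN"] then
             PySem.Str.upper (pvAfterColon (PySem.Str.strip l)) else st.1) else st.1),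
       (if PySem.Str.startswith (PySem.Str.strip l) "CONFIDENCE:" then
          (if PySem.Str.upper (pvAfterColon (PySem.Str.strip l)) ∈ ["HIGH", "MEDIUM", "LOW"] then
             PySem.Str.upper (pvAfterColon (PySem.Str.strip l)) else st.2.1) else st.2.1),
       (if PySem.Str.startswith (PySem.Str.strip l) "REASONING:" then
          pvAfterColon (PySem.Str.strip l) else st.2.2)) := by
  have hV : ("VERDICT:" : String).toList = 'V' :: ("VERDICT:" : String).toList.tail := by decide
  have hC : ("CONFIDENCE:" : String).toList = 'C' :: ("CONFIDENCE:" : String).toList.tail := by decide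
  have hR : ("REASONING:" : String).toList = 'R' :: ("REASONING:" : String).toList.tail := by decide
  simp only [pvStepA]
  by_cases hv : PySem.Str.startswith (PySem.Str.strip l) "VERDICT:" = true
  · have hc := pv_sw_disj _ _ _ _ _ hV hC (by decide) hv
    have hr := pv_sw_disj _ _ _ _ _ hV hR (by decide) hv
    simp only [hv, hc, hr, if_true, if_false, Bool.false_eq_true]
    split_ifs <;> rfl
  · rw [Bool.not_eq_true] at hv
    by_cases hc : PySem.Str.startswith (PySem.Str.strip l) "CONFIDENCE:" = true
    · have hr := pv_sw_disj _ _ _ _ _ hC hR (by decide) hc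
      simp only [hv, hc, hr, if_true, if_false, Bool.false_eq_true]
      split_ifs <;> rfl
    · rw [Bool.not_eq_true] at hc
      by_cases hr : PySem.Str.startswith (PySem.Str.strip l) "REASONING:" = true
      · simp only [hv, hc, hr, if_true, if_false, Bool.false_eq_true]
      · rw [Bool.not_eq_true] at hr
        simp only [hv, hc, hr, if_false, Bool.false_eq_true]

lemma pv_fold_eq (ls : List String) (st : String × String × String) :
    ls.foldl pvStepA st =
      (pvFindValid ((ls.reverse).map PySem.Str.strip) "VERDICT:" ["REACHABLE", "UNREACHABLE", "UNKNOWN"] st.1,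
       pvFindValid ((ls.reverse).map PySem.Str.strip) "CONFIDENCE:" ["HIGH", "MEDIUM", "LOW"] st.2.1,
       pvFindRaw ((ls.reverse).map PySem.Str.strip) "REASONING:" st.2.2) := by
  induction ls generalizing st with
  | nil => simp [pvFindValid, pvFindRaw]
  | cons l ls ih =>
      rw [List.foldl_cons, ih, pv_stepA_eq]
      simp only [List.reverse_cons, List.map_append, List.map_cons, List.map_nil,
        pv_findValid_append, pv_findRaw_append]

-- ===== VERDICT (by name: the statement is the Claim_ definition above) =====
theorem parse_feasibility_response_py_spec : Claim_equal_parse_feasibility_response_py := by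
  intro text _
  unfold Spec_parse_feasibility_response_py parse_feasibility_response_py parse_feasibility_response_py_alt
  exact pv_fold_eq _ _
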